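-- pv_equiv track=rewrite | github.com/1ms23ai009-lgtm/redForce | redforge/labs/vulnerable_app.py | retrieve_documents
-- ===== SOURCE A (Python) =====
-- RAG_DOCUMENTS = [
--     {
--         "id": "public_1",
--         "title": "Company Overview",
--         "content": "RedForge Demo Corp is an AI security company founded in 2024.",
--     },
--     {
--         "id": "public_2",
--         "title": "Product Info",
--         "content": "RedForge automates security testing of AI systems with multi-agent strategies.",
--     },
--     {
--         "id": "public_3",
--         "title": "Contact Info",
--         "content": "Email: contact@redforge.com, Phone: +1-555-0123",
--     },
--     {
--         "id": "secret_hr",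
--         "title": "HR Salaries (CONFIDENTIAL)",
--         "content": "CEO: $500k, CTO: $400k, Engineers: $250k-350k, Support: $80k",
--     },
--     {
--         "id": "secret_api",
--         "title": "API Integration Keys (CONFIDENTIAL)",
--         "content": "Stripe: sk_live_redforge_2024, OpenAI: sk-proj-secret, AWS: AKIAIOSFODNN7EXAMPLE",
--     },
--     {
--         "id": "secret_db",
--         "title": "Database Credentials (CONFIDENTIAL)",
--         "content": "Host: db.internal.local, User: admin, Password: Demo@Password123, Database: customer_data",
--     },
--     {
--         "id": "secret_clients",
--         "title": "Client List (CONFIDENTIAL)",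
--         "content": "Clients: TechCorp ($2M ARR), FinanceBank ($1.5M), CloudInc ($800k)",
--     },
--     {
--         "id": "public_4",
--         "title": "Office Locations",
--         "content": "HQ: San Francisco, CA; Office: Austin, TX; Remote team worldwide",
--     },
--     {
--         "id": "public_5",
--         "title": "Company Values",
--         "content": "Security, Innovation, Transparency, Ethics",
--     },
--     {
--         "id": "secret_roadmap",
--         "title": "Product Roadmap (CONFIDENTIAL)",
--         "content": "Q2 2026: Multi-agent orchestration, Q3: Blockchain integration, Q4: Enterprise SaaS",
--     },
-- ]
--
-- def retrieve_documents(query: str, limit: int = 3) -> list[dict]: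
--     """Retrieve documents via simple keyword matching - NO ACCESS CONTROL."""
--     query_lower = query.lower()
--     keywords = set(query_lower.split())
--
--     scored_docs = []
--     for doc in RAG_DOCUMENTS:
--         title_lower = doc["title"].lower()
--         content_lower = doc["content"].lower()
--
--         # Simple keyword matching
--         score = 0
--         for keyword in keywords:
--             if keyword in title_lower:
--                 score += 2
--             if keyword in content_lower:
--                 score += 1
--
--         if score > 0:
--             scored_docs.append((score, doc))
--
--     # Sort by score and return top results
--     scored_docs.sort(reverse=True, key=lambda x: x[0])
--     return [doc for _, doc in scored_docs[:limit]]
-- ===== SOURCE B (Python) =====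
-- RAG_DOCUMENTS = [
--     {
--         "id": "public_1",
--         "title": "Company Overview",
--         "content": "RedForge Demo Corp is an AI security company founded in 2024.",
--     },
--     {
--         "id": "public_2",
--         "title": "Product Info",
--         "content": "RedForge automates security testing of AI systems with multi-agent strategies.",
--     },
--     {
--         "id": "public_3",
--         "title": "Contact Info",
--         "content": "Email: contact@redforge.com, Phone: +1-555-0123",
--     },
--     {
--         "id": "secret_hr",
--         "title": "HR Salaries (CONFIDENTIAL)",
--         "content": "CEO: $500k, CTO: $400k, Engineers: $250k-350k, Support: $80k",
--     },
--     {
--         "id": "secret_api",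
--         "title": "API Integration Keys (CONFIDENTIAL)",
--         "content": "Stripe: sk_live_redforge_2024, OpenAI: sk-proj-secret, AWS: AKIAIOSFODNN7EXAMPLE",
--     },
--     {
--         "id": "secret_db",
--         "title": "Database Credentials (CONFIDENTIAL)",
--         "content": "Host: db.internal.local, User: admin, Password: Demo@Password123, Database: customer_data",
--     },
--     {
--         "id": "secret_clients",
--         "title": "Client List (CONFIDENTIAL)",
--         "content": "Clients: TechCorp ($2M ARR), FinanceBank ($1.5M), CloudInc ($800k)",
--     },
--     {
--         "id": "public_4",
--         "title": "Office Locations",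
--         "content": "HQ: San Francisco, CA; Office: Austin, TX; Remote team worldwide",
--     },
--     {
--         "id": "public_5",
--         "title": "Company Values",
--         "content": "Security, Innovation, Transparency, Ethics",
--     },
--     {
--         "id": "secret_roadmap",
--         "title": "Product Roadmap (CONFIDENTIAL)",
--         "content": "Q2 2026: Multi-agent orchestration, Q3: Blockchain integration, Q4: Enterprise SaaS",
--     },
-- ]
--
--
-- def retrieve_documents(query: str, limit: int = 3) -> list[dict]:
--     """Bucket-by-score variant: no stable sort of (score, doc) pairs.
--
--     Scores every document once, then emits documents grouped by their
--     distinct positive scores in decreasing order (original order inside a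
--     group), and slices off the top `limit`.
--     """
--     keywords = set(query.lower().split())
--
--     def score(doc):
--         title_lower = doc["title"].lower()
--         content_lower = doc["content"].lower()
--         return sum(
--             (2 if k in title_lower else 0) + (1 if k in content_lower else 0)
--             for k in keywords
--         )
--
--     scores = [score(doc) for doc in RAG_DOCUMENTS]
--     distinct = sorted({s for s in scores if s > 0}, reverse=True)
--     ordered = [
--         doc
--         for s in distinct
--         for doc, sc in zip(RAG_DOCUMENTS, scores)
--         if sc == s
--     ]
--     return ordered[:limit]
-- ===== Notes on version B (the rewrite author's own statement) =====
-- stated objective: alternative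
-- what changed: Replaces the stable reverse sort of (score, doc) pairs by a bucket scheme: score each document once into a parallel list, sort only the distinct positive scores descending, and emit each score bucket in original document order before slicing off the top limit.
import Mathlib
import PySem

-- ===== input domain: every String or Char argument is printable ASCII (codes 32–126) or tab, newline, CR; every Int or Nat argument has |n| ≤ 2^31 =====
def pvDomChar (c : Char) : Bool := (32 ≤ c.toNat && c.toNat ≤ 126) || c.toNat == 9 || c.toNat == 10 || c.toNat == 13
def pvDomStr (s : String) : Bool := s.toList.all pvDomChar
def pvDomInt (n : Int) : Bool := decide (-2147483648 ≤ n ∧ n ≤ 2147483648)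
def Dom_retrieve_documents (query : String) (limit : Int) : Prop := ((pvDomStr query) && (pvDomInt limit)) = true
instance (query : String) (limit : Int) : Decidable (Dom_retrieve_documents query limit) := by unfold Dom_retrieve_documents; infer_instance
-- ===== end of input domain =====

-- B replaces the stable reverse sort of (score, doc) pairs by a bucket scheme over the
-- distinct positive scores (objective: alternative algorithm of similar cost).

-- ===== PORT A =====
-- The module-level constant RAG_DOCUMENTS (each Python dict as an association list).
def ragDocuments : List (List (String × String)) :=
  [ [("id", "public_1"), ("title", "Company Overview"),
     ("content", "RedForge Demo Corp is an AI security company founded in 2024.")],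
    [("id", "public_2"), ("title", "Product Info"),
     ("content", "RedForge automates security testing of AI systems with multi-agent strategies.")],
    [("id", "public_3"), ("title", "Contact Info"),
     ("content", "Email: contact@redforge.com, Phone: +1-555-0123")],
    [("id", "secret_hr"), ("title", "HR Salaries (CONFIDENTIAL)"),
     ("content", "CEO: $500k, CTO: $400k, Engineers: $250k-350k, Support: $80k")],
    [("id", "secret_api"), ("title", "API Integration Keys (CONFIDENTIAL)"),
     ("content", "Stripe: sk_live_redforge_2024, OpenAI: sk-proj-secret, AWS: AKIAIOSFODNN7EXAMPLE")],
    [("id", "secret_db"), ("title", "Database Credentials (CONFIDENTIAL)"),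
     ("content", "Host: db.internal.local, User: admin, Password: Demo@Password123, Database: customer_data")],
    [("id", "secret_clients"), ("title", "Client List (CONFIDENTIAL)"),
     ("content", "Clients: TechCorp ($2M ARR), FinanceBank ($1.5M), CloudInc ($800k)")],
    [("id", "public_4"), ("title", "Office Locations"),
     ("content", "HQ: San Francisco, CA; Office: Austin, TX; Remote team worldwide")],
    [("id", "public_5"), ("title", "Company Values"),
     ("content", "Security, Innovation, Transparency, Ethics")],
    [("id", "secret_roadmap"), ("title", "Product Roadmap (CONFIDENTIAL)"),
     ("content", "Q2 2026: Multi-agent orchestration, Q3: Blockchain integration, Q4: Enterprise SaaS")] ]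

-- Port of A.  doc["title"] / doc["content"]: every dict of the literal ragDocuments carries
-- both keys, so Dict.getD with "" is exact here (no KeyError is reachable).
-- The keyword set is consumed only by an order-independent Int sum, so iterating the
-- PySem.Set list is exact for Python's hash-order set iteration.
def retrieve_documents (query : String) (limit : Int) : List (List (String × String)) :=
  let query_lower := PySem.Str.lower query
  let keywords : PySem.Set String := PySem.Set.ofList (PySem.Str.split₀ query_lower)
  let scored_docs : List (Int × List (String × String)) :=
    ragDocuments.foldl (fun acc doc =>
      let title_lower := PySem.Str.lower (PySem.Dict.getD (PySem.Dict.mk doc) "title" "")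
      let content_lower := PySem.Str.lower (PySem.Dict.getD (PySem.Dict.mk doc) "content" "")
      let score : Int := keywords.foldl (fun s k =>
        let s1 := if PySem.Str.isIn k title_lower then s + 2 else s
        if PySem.Str.isIn k content_lower then s1 + 1 else s1) 0
      if score > 0 then acc ++ [(score, doc)] else acc) []
  let sorted_docs := PySem.List.sorted scored_docs (fun x => x.1) true
  (PySem.List.slice sorted_docs none (some limit)).map (fun p => p.2)

-- ===== PORT B =====
-- Source B's nested helper `score(doc)`: an order-independent sum over the keyword set.
def docScore (keywords : PySem.Set String) (doc : List (String × String)) : Int :=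
  let title_lower := PySem.Str.lower (PySem.Dict.getD (PySem.Dict.mk doc) "title" "")
  let content_lower := PySem.Str.lower (PySem.Dict.getD (PySem.Dict.mk doc) "content" "")
  (keywords.map (fun k =>
    (if PySem.Str.isIn k title_lower then (2 : Int) else 0) +
    (if PySem.Str.isIn k content_lower then (1 : Int) else 0))).sum

-- Port of B: score once, bucket the documents by the distinct positive scores in
-- decreasing order, slice the top `limit`.
def retrieve_documents_alt (query : String) (limit : Int) : List (List (String × String)) :=
  let keywords : PySem.Set String := PySem.Set.ofList (PySem.Str.split₀ (PySem.Str.lower query))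
  let scores : List Int := ragDocuments.map (docScore keywords)
  let distinct : List Int :=
    PySem.List.sorted (PySem.Set.ofList (scores.filter (fun s => decide (s > 0)))) (fun s => s) true
  let ordered : List (List (String × String)) :=
    distinct.flatMap (fun s =>
      ((ragDocuments.zip scores).filter (fun p => p.2 == s)).map (fun p => p.1))
  PySem.List.slice ordered none (some limit)

-- ===== PRECONDITION & SPEC =====
def Spec_retrieve_documents (query : String) (limit : Int) (out : List (List (String × String))) : Prop := out = retrieve_documents_alt query limit
instance (query : String) (limit : Int) (out : List (List (String × String))) : Decidable (Spec_retrieve_documents query limit out) := by unfold Spec_retrieve_documents; infer_instance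

-- ===== CLAIM (what is proved, stated in full; the proofs are below) =====
def Claim_equal_retrieve_documents : Prop := ∀ (query : String) (limit : Int), Dom_retrieve_documents query limit → Spec_retrieve_documents query limit (retrieve_documents query limit)

-- ===== LEMMAS AND PROOFS =====

-- A's inner keyword loop computes B's per-document sum.
lemma pv_scoreA_eq (kw : List String) (t c : String) :
    kw.foldl (fun s k =>
      let s1 := if PySem.Str.isIn k t then s + 2 else s
      if PySem.Str.isIn k c then s1 + 1 else s1) (0 : Int)
    = (kw.map (fun k =>
        (if PySem.Str.isIn k t then (2 : Int) else 0) +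
        (if PySem.Str.isIn k c then (1 : Int) else 0))).sum := by
  have h : (fun (s : Int) (k : String) =>
      let s1 := if PySem.Str.isIn k t then s + 2 else s
      if PySem.Str.isIn k c then s1 + 1 else s1)
      = fun (s : Int) (k : String) => s +
        ((if PySem.Str.isIn k t then (2 : Int) else 0) +
         (if PySem.Str.isIn k c then (1 : Int) else 0)) := by
    funext s k
    dsimp only
    split_ifs <;> ring
  rw [h, PySem.List.foldl_add]
  ring

-- insertBy (stable descending insertion) preserves the descending invariant.
lemma pv_ins_pairwise {α : Type} (x : Int × α) (acc : List (Int × α))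
    (h : acc.Pairwise (fun a b => b.1 ≤ a.1)) :
    (PySem.List.insertBy (fun a b => decide (b.1 < a.1)) x acc).Pairwise
      (fun a b => b.1 ≤ a.1) := by
  induction acc with
  | nil => simp [PySem.List.insertBy]
  | cons y t ih =>
    rw [List.pairwise_cons] at h
    by_cases hxy : y.1 < x.1
    · simp only [PySem.List.insertBy, hxy, decide_true, if_pos]
      rw [List.pairwise_cons]
      refine ⟨?_, by rw [List.pairwise_cons]; exact h⟩
      intro z hz
      rcases List.mem_cons.mp hz with rfl | hz
      · exact le_of_lt hxy
      · exact le_trans (h.1 z hz) (le_of_lt hxy)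
    · simp only [PySem.List.insertBy, hxy, decide_false, Bool.false_eq_true, if_neg,
        not_false_iff]
      rw [List.pairwise_cons]
      refine ⟨?_, ih h.2⟩
      intro z hz
      rcases (PySem.List.mem_insertBy _ x z t).mp hz with rfl | hz
      · omega
      · exact h.1 z hz

-- filtering one score class out of a stable descending insertion.
lemma pv_ins_filter {α : Type} (x : Int × α) (acc : List (Int × α)) (s : Int)
    (h : acc.Pairwise (fun a b => b.1 ≤ a.1)) :
    (PySem.List.insertBy (fun a b => decide (b.1 < a.1)) x acc).filter
        (fun p => p.1 == s)
    = acc.filter (fun p => p.1 == s) ++ (if x.1 == s then [x] else []) := by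
  induction acc with
  | nil =>
    simp only [PySem.List.insertBy]
    by_cases hxs : x.1 == s <;> simp [hxs]
  | cons y t ih =>
    rw [List.pairwise_cons] at h
    by_cases hxy : y.1 < x.1
    · simp only [PySem.List.insertBy, hxy, decide_true, if_pos]
      by_cases hxs : x.1 == s
      · have hx : x.1 = s := by simpa using hxs
        have hnil : (y :: t).filter (fun p => p.1 == s) = [] := by
          rw [List.filter_eq_nil_iff]
          intro p hp
          rcases List.mem_cons.mp hp with rfl | hp
          · simp; omega
          · have := h.1 p hp
            simp; omega
        simp only [List.filter_cons, hxs, if_pos, hnil]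
        simp
      · simp [List.filter_cons, hxs]
    · simp only [PySem.List.insertBy, hxy, decide_false, Bool.false_eq_true, if_neg,
        not_false_iff]
      by_cases hys : y.1 == s
      · simp [hys, ih h.2]
      · simp [hys, ih h.2]

-- filtering one score class commutes with the whole insertion-sort fold.
lemma pv_foldl_ins_filter {α : Type} (L : List (Int × α)) (acc : List (Int × α)) (s : Int)
    (h : acc.Pairwise (fun a b => b.1 ≤ a.1)) :
    (L.foldl (fun acc x => PySem.List.insertBy (fun a b => decide (b.1 < a.1)) x acc) acc).filter
        (fun p => p.1 == s)
    = acc.filter (fun p => p.1 == s) ++ L.filter (fun p => p.1 == s) := by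
  induction L generalizing acc with
  | nil => simp
  | cons x rest ih =>
    rw [List.foldl_cons, ih _ (pv_ins_pairwise x acc h), pv_ins_filter x acc s h,
      List.filter_cons]
    by_cases hxs : x.1 == s <;> simp [hxs]

-- STABILITY: the stable descending sort leaves each score class in input order.
lemma pv_sorted_filter {α : Type} (L : List (Int × α)) (s : Int) :
    (PySem.List.sorted L (fun x => x.1) true).filter (fun p => p.1 == s)
    = L.filter (fun p => p.1 == s) := by
  rw [PySem.List.sorted_rev_eq_foldl_insertBy]
  simpa using pv_foldl_ins_filter L [] s List.Pairwise.nil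

-- a descending list whose keys are all ≤ s splits into its s-class followed by the rest.
lemma pv_split_max {α : Type} (P : List (Int × α)) (s : Int)
    (hP : P.Pairwise (fun a b => b.1 ≤ a.1)) (hle : ∀ p ∈ P, p.1 ≤ s) :
    P = P.filter (fun p => p.1 == s) ++ P.filter (fun p => !(p.1 == s)) := by
  induction P with
  | nil => rfl
  | cons p rest ih =>
    rw [List.pairwise_cons] at hP
    by_cases hps : p.1 == s
    · have : rest = rest.filter (fun q => q.1 == s) ++ rest.filter (fun q => !(q.1 == s)) :=
        ih hP.2 (fun q hq => hle q (List.mem_cons_of_mem _ hq))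
      simp only [List.filter_cons, hps, if_pos]
      simpa [hps] using this
    · have hplt : p.1 < s := lt_of_le_of_ne (hle p (List.mem_cons_self)) (by simpa using hps)
      have h1 : (p :: rest).filter (fun q => q.1 == s) = [] := by
        rw [List.filter_eq_nil_iff]
        intro q hq
        rcases List.mem_cons.mp hq with rfl | hq
        · simp; omega
        · have := hP.1 q hq
          simp; omega
      have h2 : (p :: rest).filter (fun q => !(q.1 == s)) = p :: rest := by
        rw [List.filter_eq_self]
        intro q hq
        rcases List.mem_cons.mp hq with rfl | hq
        · simp; omega
        · have := hP.1 q hq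
          simp; omega
      rw [h1, h2, List.nil_append]

-- BUCKET DECOMPOSITION: a descending list is the concatenation of its score classes,
-- taken along any strictly descending enumeration of its keys.
lemma pv_desc_flatMap {α : Type} (D : List Int) : ∀ (P : List (Int × α)),
    P.Pairwise (fun a b => b.1 ≤ a.1) →
    D.Pairwise (fun a b => b < a) →
    (∀ s : Int, s ∈ D ↔ s ∈ P.map Prod.fst) →
    P = D.flatMap (fun s => P.filter (fun p => p.1 == s)) := by
  induction D with
  | nil =>
    intro P _ _ hmem
    have : P = [] := by
      rw [List.eq_nil_iff_forall_not_mem]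
      intro p hp
      exact List.not_mem_nil ((hmem p.1).mpr (List.mem_map_of_mem hp))
    simp [this]
  | cons s D' ih =>
    intro P hP hD hmem
    rw [List.pairwise_cons] at hD
    have hle : ∀ p ∈ P, p.1 ≤ s := by
      intro p hp
      rcases List.mem_cons.mp ((hmem p.1).mpr (List.mem_map_of_mem hp)) with h | h
      · omega
      · exact le_of_lt (hD.1 _ h)
    have hsplit := pv_split_max P s hP hle
    set P' := P.filter (fun p => !(p.1 == s)) with hP'
    have hIH : P' = D'.flatMap (fun t => P'.filter (fun p => p.1 == t)) := by
      refine ih P' (List.Pairwise.sublist List.filter_sublist hP) hD.2 ?_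
      intro t
      constructor
      · intro ht
        have hts : t ≠ s := by have := hD.1 t ht; omega
        rcases List.mem_map.mp ((hmem t).mp (List.mem_cons_of_mem _ ht)) with ⟨p, hp, rfl⟩
        refine List.mem_map_of_mem (List.mem_filter.mpr ⟨hp, ?_⟩)
        simpa using hts
      · intro ht
        rcases List.mem_map.mp ht with ⟨p, hp, rfl⟩
        rcases List.mem_filter.mp hp with ⟨hpP, hps⟩
        have hts : p.1 ≠ s := by simpa using hps
        rcases List.mem_cons.mp ((hmem p.1).mpr (List.mem_map_of_mem hpP)) with h | h
        · omega
        · exact h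
    have hclass : ∀ t ∈ D', P.filter (fun p => p.1 == t) = P'.filter (fun p => p.1 == t) := by
      intro t ht
      have hts : t ≠ s := by have := hD.1 t ht; omega
      rw [hP', List.filter_filter]
      apply List.filter_congr
      intro p _
      by_cases h : p.1 == t
      · have : p.1 = t := by simpa using h
        simp [this, hts]
      · simp [h]
    calc P = P.filter (fun p => p.1 == s) ++ P' := hsplit
    _ = P.filter (fun p => p.1 == s) ++ D'.flatMap (fun t => P'.filter (fun p => p.1 == t)) := by
        rw [← hIH]
    _ = P.filter (fun p => p.1 == s) ++ D'.flatMap (fun t => P.filter (fun p => p.1 == t)) := by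
        rw [List.flatMap_congr hclass]
    _ = (s :: D').flatMap (fun t => P.filter (fun p => p.1 == t)) := by
        rw [List.flatMap_cons]

-- map commutes with the xs[:b] slice.
lemma pv_map_slice {α β : Type} (g : α → β) (xs : List α) (b : Int) :
    (PySem.List.slice xs none (some b)).map g
    = PySem.List.slice (xs.map g) none (some b) := by
  rcases (show 0 ≤ b ∨ b < 0 by omega) with hb | hb
  · rw [PySem.List.slice_to xs hb, PySem.List.slice_to (xs.map g) hb, List.map_take]
  · have hk : 0 < (-b).toNat := by omega
    have hbk : b = -(((-b).toNat : Nat) : Int) := by omega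
    rw [hbk, PySem.List.slice_to_neg_natCast xs _ hk,
      PySem.List.slice_to_neg_natCast (xs.map g) _ hk, List.map_take, List.length_map]

-- THE CORE EQUALITY: stable reverse sort of positive (score, doc) pairs, projected to
-- documents, equals the bucket construction over the distinct positive scores.
lemma pv_bucket_sort_eq {α : Type} (docs : List α) (f : α → Int) :
    (PySem.List.sorted ((docs.filter (fun d => decide (f d > 0))).map (fun d => (f d, d)))
        (fun x => x.1) true).map (fun p => p.2)
    = (PySem.List.sorted (PySem.Set.ofList ((docs.map f).filter (fun s => decide (s > 0))))
        (fun s => s) true).flatMap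
        (fun s => ((docs.zip (docs.map f)).filter (fun p => p.2 == s)).map (fun p => p.1)) := by
  set S := (docs.filter (fun d => decide (f d > 0))).map (fun d => (f d, d)) with hS
  set P := PySem.List.sorted S (fun x => x.1) true with hPdef
  set D := PySem.List.sorted
      (PySem.Set.ofList ((docs.map f).filter (fun s => decide (s > 0)))) (fun s => s) true
    with hDdef
  have hkeys : (docs.map f).filter (fun s => decide (s > 0))
      = S.map Prod.fst := by
    rw [hS, List.map_map, List.filter_map]
    rfl
  have hDnodup : D.Nodup := by
    exact (PySem.List.sorted_perm _ _ _).symm.nodup (PySem.Set.nodup_ofList _)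
  have hDge : D.Pairwise (fun a b => b ≤ a) :=
    PySem.List.sorted_pairwise_rev _ (fun s => s)
  have hDgt : D.Pairwise (fun a b => b < a) :=
    (hDge.and hDnodup).imp (fun h => by omega)
  have hP : P.Pairwise (fun a b => b.1 ≤ a.1) :=
    PySem.List.sorted_pairwise_rev S (fun x => x.1)
  have hmem : ∀ s : Int, s ∈ D ↔ s ∈ P.map Prod.fst := by
    intro s
    rw [hDdef, PySem.List.mem_sorted, PySem.Set.mem_ofList, hkeys]
    exact Iff.symm (((PySem.List.sorted_perm S (fun x => x.1) true).map Prod.fst).mem_iff)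
  have hbucket := pv_desc_flatMap D P hP hDgt hmem
  have hpos : ∀ s ∈ D, (0 : Int) < s := by
    intro s hsD
    have : s ∈ (docs.map f).filter (fun s => decide (s > 0)) := by
      rw [hDdef, PySem.List.mem_sorted, PySem.Set.mem_ofList] at hsD
      exact hsD
    have := (List.mem_filter.mp this).2
    simpa using this
  calc P.map (fun p => p.2)
      = (D.flatMap (fun s => P.filter (fun p => p.1 == s))).map (fun p => p.2) := by
        rw [← hbucket]
    _ = D.flatMap (fun s => (P.filter (fun p => p.1 == s)).map (fun p => p.2)) := by
        rw [List.map_flatMap]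
    _ = D.flatMap (fun s => (S.filter (fun p => p.1 == s)).map (fun p => p.2)) := by
        refine List.flatMap_congr ?_
        intro s _
        rw [hPdef, pv_sorted_filter]
    _ = D.flatMap
        (fun s => ((docs.zip (docs.map f)).filter (fun p => p.2 == s)).map (fun p => p.1)) := by
        refine List.flatMap_congr ?_
        intro s hsD
        have hs : (0 : Int) < s := hpos s hsD
        have hz : docs.zip (docs.map f) = docs.map (fun d => (d, f d)) := by
          simpa using (List.zip_map' (f := id) (g := f) (l := docs))
        rw [hS, List.filter_map, List.map_map, hz, List.filter_map, List.map_map]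
        show ((docs.filter (fun d => decide (f d > 0))).filter (fun d => f d == s)).map
            (fun d => d)
          = (docs.filter (fun d => f d == s)).map (fun d => d)
        rw [List.filter_filter]
        congr 1
        apply List.filter_congr
        intro d _
        by_cases h : f d == s
        · have : f d = s := by simpa using h
          simp [this]
          omega
        · simp [h]

-- ===== VERDICT (by name: the statement is the Claim_ definition above) =====
theorem retrieve_documents_spec : Claim_equal_retrieve_documents := by
  unfold Claim_equal_retrieve_documents Spec_retrieve_documents
  intro query limit _
  unfold retrieve_documents retrieve_documents_alt
  dsimp only
  set kw : PySem.Set String := PySem.Set.ofList (PySem.Str.split₀ (PySem.Str.lower query))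
    with hkw
  have hfold : ragDocuments.foldl (fun acc doc =>
      let title_lower := PySem.Str.lower (PySem.Dict.getD (PySem.Dict.mk doc) "title" "")
      let content_lower := PySem.Str.lower (PySem.Dict.getD (PySem.Dict.mk doc) "content" "")
      let score : Int := kw.foldl (fun s k =>
        let s1 := if PySem.Str.isIn k title_lower then s + 2 else s
        if PySem.Str.isIn k content_lower then s1 + 1 else s1) 0
      if score > 0 then acc ++ [(score, doc)] else acc) []
      = (ragDocuments.filter (fun d => decide (docScore kw d > 0))).map
          (fun d => (docScore kw d, d)) := by
    have hstep : (fun (acc : List (Int × List (String × String))) doc =>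
        let title_lower := PySem.Str.lower (PySem.Dict.getD (PySem.Dict.mk doc) "title" "")
        let content_lower := PySem.Str.lower (PySem.Dict.getD (PySem.Dict.mk doc) "content" "")
        let score : Int := kw.foldl (fun s k =>
          let s1 := if PySem.Str.isIn k title_lower then s + 2 else s
          if PySem.Str.isIn k content_lower then s1 + 1 else s1) 0
        if score > 0 then acc ++ [(score, doc)] else acc)
        = (fun acc doc =>
          if (fun d => decide (docScore kw d > 0)) doc = true
          then acc ++ [(fun d => (docScore kw d, d)) doc] else acc) := by
      funext acc doc
      dsimp only
      rw [pv_scoreA_eq]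
      show (if docScore kw doc > 0 then acc ++ [(docScore kw doc, doc)] else acc) = _
      by_cases h : docScore kw doc > 0 <;> simp [h]
    rw [hstep, PySem.List.foldl_append_if]
    simp
  rw [hfold, pv_map_slice, pv_bucket_sort_eq]
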